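-- pv_equiv track=rewrite | github.com/RebecaCAstro22/fundamentos-python | Trabajo de Clase11/10.3.2 Juego del entorno.py | contar_vecinos_unos
-- ===== SOURCE A (Python) =====
-- def contar_vecinos_unos(matriz, n, m):
--     resultado = [[0] * m for _ in range(n)]
--     direcciones = [(-1, -1), (-1, 0), (-1, 1), (0, -1), (0, 1), (1, -1), (1, 0), (1, 1)]
--
--     for i in range(n):
--         for j in range(m):
--             cuenta = 0
--             for dx, dy in direcciones:
--                 x, y = i + dx, j + dy
--                 if 0 <= x < n and 0 <= y < m and matriz[x][y] == 1:
--                     cuenta += 1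
--             resultado[i][j] = cuenta
--     return resultado
-- ===== SOURCE B (Python) =====
-- def contar_vecinos_unos(matriz, n, m):
--     # Separable 3x3 window sum: binarize, horizontal 3-window pass, vertical
--     # 3-window pass, minus the center indicator.
--     ind = [[1 if matriz[i][j] == 1 else 0 for j in range(m)] for i in range(n)]
--     h = [[(row[j - 1] if 0 < j else 0) + row[j] + (row[j + 1] if j + 1 < m else 0)
--           for j in range(m)] for row in ind]
--     return [[(h[i - 1][j] if 0 < i else 0) + h[i][j] + (h[i + 1][j] if i + 1 < n else 0) - ind[i][j]
--              for j in range(m)] for i in range(n)]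
-- ===== Notes on version B (the rewrite author's own statement) =====
-- stated objective: alternative
-- what changed: Replaces the per-cell scan over an 8-direction offset list by a separable convolution: binarize once, one pass of horizontal 3-window sums, one pass of vertical 3-window sums, then subtract the center indicator.
-- outside the precondition, e.g. on contar_vecinos_unos([], 1, 1): A returns [[0]], B raises IndexError
import Mathlib
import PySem

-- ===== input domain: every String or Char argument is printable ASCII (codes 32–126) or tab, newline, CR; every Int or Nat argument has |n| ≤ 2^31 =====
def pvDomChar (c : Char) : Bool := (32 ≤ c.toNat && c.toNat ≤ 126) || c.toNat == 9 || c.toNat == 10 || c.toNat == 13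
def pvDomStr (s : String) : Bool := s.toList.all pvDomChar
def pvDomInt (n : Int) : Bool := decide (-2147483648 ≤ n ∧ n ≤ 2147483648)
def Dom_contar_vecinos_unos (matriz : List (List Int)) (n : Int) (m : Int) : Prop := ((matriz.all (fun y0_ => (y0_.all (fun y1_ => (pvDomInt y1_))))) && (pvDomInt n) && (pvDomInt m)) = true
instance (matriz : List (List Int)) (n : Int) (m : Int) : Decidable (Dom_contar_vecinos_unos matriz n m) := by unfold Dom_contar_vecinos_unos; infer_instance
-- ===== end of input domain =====

-- B replaces the 8-direction per-cell scan by a separable 3x3 window sum (two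
-- window passes, minus the center indicator); same cost class, different algorithm.

-- ===== PORT A =====
def contar_vecinos_unos (matriz : List (List Int)) (n : Int) (m : Int) : List (List Int) :=
  let direcciones : List (Int × Int) :=
    [(-1, -1), (-1, 0), (-1, 1), (0, -1), (0, 1), (1, -1), (1, 0), (1, 1)]
  (PySem.List.pyRange 0 n 1).map (fun i =>
    (PySem.List.pyRange 0 m 1).map (fun j =>
      direcciones.foldl (fun cuenta d =>
        let x := i + d.1
        let y := j + d.2
        -- `matriz[x][y]` is reached only after the bound checks; in range under Pre_, so pyGetD is exact
        if 0 ≤ x ∧ x < n ∧ 0 ≤ y ∧ y < m ∧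
            PySem.List.pyGetD (PySem.List.pyGetD matriz x []) y 0 = 1
        then cuenta + 1 else cuenta) 0))

-- ===== PORT B =====
-- all ind/h accesses are in range by construction, and matriz[i][j] in range under Pre_, so pyGetD is exact
def contar_vecinos_unos_alt (matriz : List (List Int)) (n : Int) (m : Int) : List (List Int) :=
  let ind : List (List Int) := (PySem.List.pyRange 0 n 1).map (fun i =>
    (PySem.List.pyRange 0 m 1).map (fun j =>
      if PySem.List.pyGetD (PySem.List.pyGetD matriz i []) j 0 = 1 then (1 : Int) else 0))
  let h : List (List Int) := ind.map (fun row =>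
    (PySem.List.pyRange 0 m 1).map (fun j =>
      (if 0 < j then PySem.List.pyGetD row (j - 1) 0 else 0) +
      PySem.List.pyGetD row j 0 +
      (if j + 1 < m then PySem.List.pyGetD row (j + 1) 0 else 0)))
  (PySem.List.pyRange 0 n 1).map (fun i =>
    (PySem.List.pyRange 0 m 1).map (fun j =>
      (if 0 < i then PySem.List.pyGetD (PySem.List.pyGetD h (i - 1) []) j 0 else 0) +
      PySem.List.pyGetD (PySem.List.pyGetD h i []) j 0 +
      (if i + 1 < n then PySem.List.pyGetD (PySem.List.pyGetD h (i + 1) []) j 0 else 0) -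
      PySem.List.pyGetD (PySem.List.pyGetD ind i []) j 0))

-- ===== PRECONDITION & SPEC =====
-- Pre_ excludes the inputs where A raises IndexError (some cell of the n×m grid missing,
-- with n ≥ 2 or m ≥ 2), and additionally the degenerate n = m = 1 grids whose single cell is
-- missing, where A returns [[0]] without ever reading the matrix but B's single-cell read raises.
def Pre_contar_vecinos_unos (matriz : List (List Int)) (n : Int) (m : Int) : Prop :=
  n ≤ 0 ∨ m ≤ 0 ∨
    (n ≤ (matriz.length : Int) ∧ ∀ row ∈ matriz.take n.toNat, m ≤ (row.length : Int))
instance (matriz : List (List Int)) (n : Int) (m : Int) : Decidable (Pre_contar_vecinos_unos matriz n m) := by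
  unfold Pre_contar_vecinos_unos; infer_instance

def pvWitness_contar_vecinos_unos : List (List Int) × Int × Int := ([[1, 0], [1, 1]], 2, 2)

def Spec_contar_vecinos_unos (matriz : List (List Int)) (n : Int) (m : Int) (out : List (List Int)) : Prop := out = contar_vecinos_unos_alt matriz n m
instance (matriz : List (List Int)) (n : Int) (m : Int) (out : List (List Int)) : Decidable (Spec_contar_vecinos_unos matriz n m out) := by unfold Spec_contar_vecinos_unos; infer_instance

-- ===== CLAIM (what is proved, stated in full; the proofs are below) =====
def Claim_equal_contar_vecinos_unos : Prop := ∀ (matriz : List (List Int)) (n : Int) (m : Int), Dom_contar_vecinos_unos matriz n m → Pre_contar_vecinos_unos matriz n m → Spec_contar_vecinos_unos matriz n m (contar_vecinos_unos matriz n m)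

-- ===== LEMMAS AND PROOFS =====

-- the bound-checked cell indicator both programs count, and its unchecked core
def pvInd (matriz : List (List Int)) (x y : Int) : Int :=
  if PySem.List.pyGetD (PySem.List.pyGetD matriz x []) y 0 = 1 then 1 else 0

def pvG (matriz : List (List Int)) (n m x y : Int) : Int :=
  if 0 ≤ x ∧ x < n ∧ 0 ≤ y ∧ y < m then pvInd matriz x y else 0

-- the two row shapes B builds (named so the proof can fold the goal onto them)
def pvIndRow (matriz : List (List Int)) (m x : Int) : List Int :=
  (PySem.List.pyRange 0 m 1).map (fun j =>
    if PySem.List.pyGetD (PySem.List.pyGetD matriz x []) j 0 = 1 then 1 else 0)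

def pvHRow (m : Int) (row : List Int) : List Int :=
  (PySem.List.pyRange 0 m 1).map (fun j =>
    (if 0 < j then PySem.List.pyGetD row (j - 1) 0 else 0) + PySem.List.pyGetD row j 0 +
    (if j + 1 < m then PySem.List.pyGetD row (j + 1) 0 else 0))

theorem pvIndRow_def (matriz : List (List Int)) (m : Int) :
    (fun x => List.map (fun j =>
        if PySem.List.pyGetD (PySem.List.pyGetD matriz x []) j 0 = 1 then (1 : Int) else 0)
      (PySem.List.pyRange 0 m 1)) = pvIndRow matriz m := rfl

theorem pvHRow_def (m : Int) :
    (fun row => List.map (fun j =>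
        (if 0 < j then PySem.List.pyGetD row (j - 1) 0 else 0) + PySem.List.pyGetD row j 0 +
        (if j + 1 < m then PySem.List.pyGetD row (j + 1) 0 else 0))
      (PySem.List.pyRange 0 m 1)) = pvHRow m := rfl

theorem pvAddIf (c : Int) (P : Prop) [Decidable P] :
    (if P then c + 1 else c) = c + (if P then (1 : Int) else 0) := by
  split <;> ring

theorem pvCondSplit (matriz : List (List Int)) (n m x y : Int) :
    (if 0 ≤ x ∧ x < n ∧ 0 ≤ y ∧ y < m ∧
        PySem.List.pyGetD (PySem.List.pyGetD matriz x []) y 0 = 1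
      then (1 : Int) else 0) = pvG matriz n m x y := by
  unfold pvG pvInd; split_ifs <;> first | rfl | tauto

theorem pvGeq (matriz : List (List Int)) (n m x y : Int) (P : Prop) [Decidable P]
    (h : P ↔ 0 ≤ x ∧ x < n ∧ 0 ≤ y ∧ y < m) :
    pvG matriz n m x y = if P then pvInd matriz x y else 0 := by
  unfold pvG; split_ifs <;> first | rfl | tauto

theorem pvLook {α : Type} (f : Int → α) (d : α) (n i : Int) (h1 : 0 ≤ i) (h2 : i < n) :
    PySem.List.pyGetD ((PySem.List.pyRange 0 n 1).map f) i d = f i :=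
  PySem.List.pyGetD_map_pyRange_of_nonneg f n i d h1 h2

theorem pvIndLook (matriz : List (List Int)) (m x y : Int) (hy : 0 ≤ y ∧ y < m) :
    PySem.List.pyGetD (pvIndRow matriz m x) y 0 = pvInd matriz x y := by
  unfold pvIndRow pvInd; exact pvLook _ _ m y hy.1 hy.2

theorem pvRowVal (matriz : List (List Int)) (m x j : Int) (hj : 0 ≤ j ∧ j < m) :
    PySem.List.pyGetD (pvHRow m (pvIndRow matriz m x)) j 0 =
      (if 0 < j then pvInd matriz x (j - 1) else 0) + pvInd matriz x j +
      (if j + 1 < m then pvInd matriz x (j + 1) else 0) := by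
  obtain ⟨hj0, hj1⟩ := hj
  unfold pvHRow
  rw [pvLook _ _ m j hj0 hj1]
  by_cases h0 : 0 < j <;> by_cases h1 : j + 1 < m
  · simp only [if_pos h0, if_pos h1, pvIndLook matriz m x (j - 1) ⟨by omega, by omega⟩,
      pvIndLook matriz m x j ⟨hj0, hj1⟩, pvIndLook matriz m x (j + 1) ⟨by omega, h1⟩]
  · simp only [if_pos h0, if_neg h1, pvIndLook matriz m x (j - 1) ⟨by omega, by omega⟩,
      pvIndLook matriz m x j ⟨hj0, hj1⟩]
  · simp only [if_neg h0, if_pos h1, pvIndLook matriz m x j ⟨hj0, hj1⟩,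
      pvIndLook matriz m x (j + 1) ⟨by omega, h1⟩]
  · simp only [if_neg h0, if_neg h1, pvIndLook matriz m x j ⟨hj0, hj1⟩]

theorem pvColVal (matriz : List (List Int)) (n m x j : Int)
    (hx : 0 ≤ x ∧ x < n) (hj : 0 ≤ j ∧ j < m) :
    PySem.List.pyGetD (PySem.List.pyGetD
        (List.map (pvHRow m ∘ pvIndRow matriz m) (PySem.List.pyRange 0 n 1)) x []) j 0 =
      (if 0 < j then pvInd matriz x (j - 1) else 0) + pvInd matriz x j +
      (if j + 1 < m then pvInd matriz x (j + 1) else 0) := by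
  rw [pvLook _ _ n x hx.1 hx.2, Function.comp_apply]
  exact pvRowVal matriz m x j hj

theorem pvColValIf (matriz : List (List Int)) (n m x j : Int) (P : Prop) [Decidable P]
    (hP : P → 0 ≤ x ∧ x < n) (hj : 0 ≤ j ∧ j < m) :
    (if P then PySem.List.pyGetD (PySem.List.pyGetD
        (List.map (pvHRow m ∘ pvIndRow matriz m) (PySem.List.pyRange 0 n 1)) x []) j 0 else 0) =
      (if P then (if 0 < j then pvInd matriz x (j - 1) else 0) + pvInd matriz x j +
        (if j + 1 < m then pvInd matriz x (j + 1) else 0) else 0) := by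
  by_cases h : P
  · rw [if_pos h, if_pos h]; exact pvColVal matriz n m x j (hP h) hj
  · rw [if_neg h, if_neg h]

theorem pvIndVal (matriz : List (List Int)) (n m x j : Int)
    (hx : 0 ≤ x ∧ x < n) (hj : 0 ≤ j ∧ j < m) :
    PySem.List.pyGetD (PySem.List.pyGetD
        (List.map (pvIndRow matriz m) (PySem.List.pyRange 0 n 1)) x []) j 0 =
      pvInd matriz x j := by
  rw [pvLook _ _ n x hx.1 hx.2]
  exact pvIndLook matriz m x j hj

theorem pvPortsEq (matriz : List (List Int)) (n m : Int) :
    contar_vecinos_unos matriz n m = contar_vecinos_unos_alt matriz n m := by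
  unfold contar_vecinos_unos contar_vecinos_unos_alt
  dsimp only
  rw [List.map_map]
  apply List.map_congr_left
  intro i hi
  rw [PySem.List.mem_pyRange_one] at hi
  apply List.map_congr_left
  intro j hj
  rw [PySem.List.mem_pyRange_one] at hj
  -- left side: unfold the 8-step foldl into a sum of pvG values
  simp only [List.foldl_cons, List.foldl_nil, pvAddIf, pvCondSplit, add_zero]
  rw [show i + -1 = i - 1 from by ring, show j + -1 = j - 1 from by ring]
  -- right side: fold the two row shapes, then resolve the in-range table lookups
  rw [pvIndRow_def matriz m, pvHRow_def m]
  rw [pvColValIf matriz n m (i - 1) j (0 < i) (fun h => ⟨by omega, by omega⟩) hj,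
      pvColValIf matriz n m (i + 1) j (i + 1 < n) (fun h => ⟨by omega, h⟩) hj,
      pvColVal matriz n m i j hi hj, pvIndVal matriz n m i j hi hj]
  -- both sides are now guarded sums of pvInd values
  rw [pvGeq matriz n m (i - 1) (j - 1) (0 < i ∧ 0 < j) (by omega),
      pvGeq matriz n m (i - 1) j (0 < i) (by omega),
      pvGeq matriz n m (i - 1) (j + 1) (0 < i ∧ j + 1 < m) (by omega),
      pvGeq matriz n m i (j - 1) (0 < j) (by omega),
      pvGeq matriz n m i (j + 1) (j + 1 < m) (by omega),
      pvGeq matriz n m (i + 1) (j - 1) (i + 1 < n ∧ 0 < j) (by omega),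
      pvGeq matriz n m (i + 1) j (i + 1 < n) (by omega),
      pvGeq matriz n m (i + 1) (j + 1) (i + 1 < n ∧ j + 1 < m) (by omega)]
  by_cases h1 : 0 < i <;> by_cases h2 : i + 1 < n <;> by_cases h3 : 0 < j <;>
      by_cases h4 : j + 1 < m <;>
    simp only [h1, h2, h3, h4, and_true, and_false, if_true, if_false] <;>
    ring

-- ===== VERDICT (by name: the statement is the Claim_ definition above) =====
theorem contar_vecinos_unos_spec : Claim_equal_contar_vecinos_unos := by
  intro matriz n m _ _
  unfold Spec_contar_vecinos_unos
  exact pvPortsEq matriz n m
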